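-- pv_equiv track=rewrite | github.com/jahnavipurohit/PDSA_IITM | week7/PPA2.py | calculate_total_lateness
-- ===== SOURCE A (Python) =====
-- def calculate_total_lateness(N, jobs, schedule):
--     """
--     Calculates the total lateness for a given schedule.
--
--     Args:
--         N (int): The number of independent working lines.
--         jobs (list of tuple): The original list of jobs.
--         schedule (list of list): The schedule to evaluate.
--
--     Returns:
--         int: The total lateness.
--     """
--     # Create a dictionary for quick lookup of job details by ID.
--     job_details = {job[0]: job for job in jobs}
--     total_lateness = 0
--
--     # Track the completion time for each line.
--     line_completion_times = [0] * N
--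
--     # Iterate through each line and its scheduled jobs.
--     for i in range(N):
--         current_line_time = 0
--         for job_id in schedule[i]:
--             _, time_required, due_time = job_details[job_id]
--             current_line_time += time_required
--
--             # Calculate the lateness for the current job.
--             lateness = max(0, current_line_time - due_time)
--             total_lateness += lateness
--
--     return total_lateness
-- ===== SOURCE B (Python) =====
-- def calculate_total_lateness(N, jobs, schedule):
--     job_details = {job[0]: job for job in jobs}
--
--     def line_total(line, elapsed):
--         # recursive lateness of one line given time already elapsed
--         if not line:
--             return 0
--         _, time_required, due_time = job_details[line[0]]
--         finish = elapsed + time_required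
--         return max(0, finish - due_time) + line_total(line[1:], finish)
--
--     return sum(line_total(schedule[i], 0) for i in range(N))
-- ===== Notes on version B (the rewrite author's own statement) =====
-- stated objective: alternative
-- what changed: Replaced A's nested index loop with a mutable (total, current_time) accumulator by a per-line recursive helper that returns each line's lateness directly, summed over the lines with sum(...); no running total or completion-time state is threaded across lines.
import Mathlib
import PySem

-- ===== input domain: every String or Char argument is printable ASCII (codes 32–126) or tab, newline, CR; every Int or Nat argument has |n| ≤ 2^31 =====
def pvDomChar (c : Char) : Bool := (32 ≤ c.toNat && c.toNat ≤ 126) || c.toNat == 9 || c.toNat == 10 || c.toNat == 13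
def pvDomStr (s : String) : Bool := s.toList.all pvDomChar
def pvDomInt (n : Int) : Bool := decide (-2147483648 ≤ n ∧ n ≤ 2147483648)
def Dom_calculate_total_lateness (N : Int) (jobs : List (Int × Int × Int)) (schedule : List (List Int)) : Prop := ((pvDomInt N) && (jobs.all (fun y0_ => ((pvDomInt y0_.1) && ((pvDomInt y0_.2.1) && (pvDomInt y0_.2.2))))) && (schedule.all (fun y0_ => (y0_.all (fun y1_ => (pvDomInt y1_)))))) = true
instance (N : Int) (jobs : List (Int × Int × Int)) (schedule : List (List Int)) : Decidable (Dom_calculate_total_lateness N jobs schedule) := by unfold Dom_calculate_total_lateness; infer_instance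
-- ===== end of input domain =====

-- B replaces A's nested index loop with a threaded (total, current_time) accumulator by a
-- recursive per-line helper summed over the lines (objective: alternative decomposition).

-- ===== PORT A =====
-- port of A: dict comprehension, dead [0]*N list, then for i in range(N) with a running
-- (total_lateness, current_line_time) state over schedule[i].
-- job_details[job_id] raises KeyError and schedule[i] IndexError in Python: excluded by Pre_,
-- the port uses a default there.
def calculate_total_lateness (N : Int) (jobs : List (Int × Int × Int)) (schedule : List (List Int)) : Int :=
  let job_details : PySem.Dict Int (Int × Int × Int) :=
    jobs.foldl (fun d job => d.insert job.1 job) PySem.Dict.empty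
  let total_lateness : Int := 0
  let _line_completion_times : List Int := List.replicate N.toNat 0
  (PySem.List.pyRange 0 N 1).foldl
    (fun total i =>
      let line := (PySem.List.pyGet? schedule i).getD []
      (line.foldl
        (fun (st : Int × Int) job_id =>
          let job := (job_details.get? job_id).getD (0, 0, 0)
          let cur := st.2 + job.2.1
          let lateness := max 0 (cur - job.2.2)
          (st.1 + lateness, cur))
        (total, 0)).1)
    total_lateness

-- ===== PORT B =====
-- port of B's recursive helper line_total(line, elapsed)
def pvLineTotal (job_details : PySem.Dict Int (Int × Int × Int)) : List Int → Int → Int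
  | [], _ => 0
  | job_id :: rest, elapsed =>
    let job := (job_details.get? job_id).getD (0, 0, 0)
    let finish := elapsed + job.2.1
    max 0 (finish - job.2.2) + pvLineTotal job_details rest finish

def calculate_total_lateness_alt (N : Int) (jobs : List (Int × Int × Int)) (schedule : List (List Int)) : Int :=
  let job_details : PySem.Dict Int (Int × Int × Int) :=
    jobs.foldl (fun d job => d.insert job.1 job) PySem.Dict.empty
  ((PySem.List.pyRange 0 N 1).map
    (fun i => pvLineTotal job_details ((PySem.List.pyGet? schedule i).getD []) 0)).sum

-- ===== PRECONDITION & SPEC =====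
-- Pre_: the Python raises IndexError when N exceeds the number of lines, and KeyError when a
-- scheduled job_id (on one of the first N lines) is not a key of jobs; exactly those are excluded.
def Pre_calculate_total_lateness (N : Int) (jobs : List (Int × Int × Int)) (schedule : List (List Int)) : Prop :=
  N ≤ (schedule.length : Int) ∧
  ∀ line ∈ schedule.take N.toNat, ∀ j ∈ line, ∃ job ∈ jobs, job.1 = j
instance (N : Int) (jobs : List (Int × Int × Int)) (schedule : List (List Int)) : Decidable (Pre_calculate_total_lateness N jobs schedule) := by unfold Pre_calculate_total_lateness; infer_instance

def pvWitness_calculate_total_lateness : Int × (List (Int × Int × Int)) × List (List Int) :=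
  (2, [(1, 3, 2), (2, 1, 5)], [[1, 2], [2]])

def Spec_calculate_total_lateness (N : Int) (jobs : List (Int × Int × Int)) (schedule : List (List Int)) (out : Int) : Prop := out = calculate_total_lateness_alt N jobs schedule
instance (N : Int) (jobs : List (Int × Int × Int)) (schedule : List (List Int)) (out : Int) : Decidable (Spec_calculate_total_lateness N jobs schedule out) := by unfold Spec_calculate_total_lateness; infer_instance

-- ===== CLAIM (what is proved, stated in full; the proofs are below) =====
def Claim_equal_calculate_total_lateness : Prop := ∀ (N : Int) (jobs : List (Int × Int × Int)) (schedule : List (List Int)), Dom_calculate_total_lateness N jobs schedule → Pre_calculate_total_lateness N jobs schedule → Spec_calculate_total_lateness N jobs schedule (calculate_total_lateness N jobs schedule)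

-- ===== LEMMAS AND PROOFS =====

-- A's inner foldl over one line equals the starting total plus B's recursive line total.
theorem pvInner_eq (jd : PySem.Dict Int (Int × Int × Int)) (line : List Int) (tot cur : Int) :
    (line.foldl
      (fun (st : Int × Int) job_id =>
        let job := (jd.get? job_id).getD (0, 0, 0)
        let c := st.2 + job.2.1
        (st.1 + max 0 (c - job.2.2), c))
      (tot, cur)).1 = tot + pvLineTotal jd line cur := by
  induction line generalizing tot cur with
  | nil => simp [pvLineTotal]
  | cons j rest ih =>
    simp only [List.foldl_cons, pvLineTotal]
    rw [ih]
    ring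

-- A's outer foldl over any index list equals init plus the sum of B's per-line totals.
theorem pvOuter_eq (jd : PySem.Dict Int (Int × Int × Int)) (schedule : List (List Int))
    (r : List Int) (init : Int) :
    (r.foldl
      (fun total i =>
        (((PySem.List.pyGet? schedule i).getD []).foldl
          (fun (st : Int × Int) job_id =>
            let job := (jd.get? job_id).getD (0, 0, 0)
            let cur := st.2 + job.2.1
            let lateness := max 0 (cur - job.2.2)
            (st.1 + lateness, cur))
          (total, 0)).1)
      init) =
    init + (r.map (fun i => pvLineTotal jd ((PySem.List.pyGet? schedule i).getD []) 0)).sum := by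
  induction r generalizing init with
  | nil => simp
  | cons i rest ih =>
    simp only [List.foldl_cons, List.map_cons, List.sum_cons]
    rw [pvInner_eq, ih]
    ring

theorem calculate_total_lateness_eq_alt (N : Int) (jobs : List (Int × Int × Int)) (schedule : List (List Int)) :
    calculate_total_lateness N jobs schedule = calculate_total_lateness_alt N jobs schedule := by
  unfold calculate_total_lateness calculate_total_lateness_alt
  rw [pvOuter_eq]
  ring

-- ===== VERDICT (by name: the statement is the Claim_ definition above) =====
theorem calculate_total_lateness_spec : Claim_equal_calculate_total_lateness := by
  intro N jobs schedule _ _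
  exact calculate_total_lateness_eq_alt N jobs schedule
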